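-- pv_equiv track=rewrite | github.com/LyanKaleu/IFPI-166-PYTHON | Mensagens-Secretas/CalculadoraDoAmor.py | calcular_compatibilidade
-- ===== SOURCE A (Python) =====
-- def calcular_compatibilidade(nome1, nome2):
--     palavra_amor = "amor"
--     vogais = "aeiou"
--     placar = 0
--     min_len = min(len(nome1), len(nome2))
--
--     for i in range(min_len):
--         char1 = nome1[i].lower()
--         char2 = nome2[i].lower()
--
--         if char1 in palavra_amor:
--             placar += 2
--         if char2 in palavra_amor:
--             placar += 2
--
--         if char1 in vogais:
--             placar += 1
--         if char2 in vogais: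
--             placar += 1
--
--     return placar
-- ===== SOURCE B (Python) =====
-- def calcular_compatibilidade(nome1, nome2):
--     min_len = min(len(nome1), len(nome2))
--     total = 0
--     for nome in (nome1, nome2):
--         freq = {}
--         for c in nome[:min_len].lower():
--             freq[c] = freq.get(c, 0) + 1
--         total += 2 * sum(freq.get(c, 0) for c in "amor")
--         total += sum(freq.get(c, 0) for c in "aeiou")
--     return total
-- ===== Notes on version B (the rewrite author's own statement) =====
-- stated objective: idiomatic
-- what changed: B replaces A's per-index loop with four membership branches by building a letter-frequency table of each name's lowercased min_len prefix and summing the table over the fixed letter sets 'amor' (weight 2) and 'aeiou' (weight 1).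
import Mathlib
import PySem

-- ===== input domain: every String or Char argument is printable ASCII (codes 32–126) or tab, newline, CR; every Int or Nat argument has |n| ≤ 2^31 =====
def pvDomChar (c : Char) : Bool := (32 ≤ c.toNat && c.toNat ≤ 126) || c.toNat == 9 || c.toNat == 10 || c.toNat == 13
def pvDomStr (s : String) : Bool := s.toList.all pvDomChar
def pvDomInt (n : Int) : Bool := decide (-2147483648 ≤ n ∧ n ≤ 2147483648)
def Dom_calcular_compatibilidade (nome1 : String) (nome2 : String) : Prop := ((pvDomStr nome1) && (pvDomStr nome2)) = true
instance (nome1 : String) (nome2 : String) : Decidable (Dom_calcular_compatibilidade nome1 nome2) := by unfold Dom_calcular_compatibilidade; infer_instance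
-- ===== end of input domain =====

-- B replaces A's per-index branch loop by a letter-frequency table per lowercased prefix,
-- summed over the fixed letter sets "amor" (×2) and "aeiou" (idiomatic; same asymptotic cost).

-- ===== PORT A =====
-- Loop body of A's for-loop (A indexes nome1[i]/nome2[i]; i is always in range, so pyGetD is exact;
-- `char1 in "amor"` for the single-character string char1 is exactly char membership).
def pvStepA (l1 l2 : List Char) (placar : Int) (i : Int) : Int :=
  let char1 := PySem.Chars.lowerChar (PySem.List.pyGetD l1 i ' ')
  let char2 := PySem.Chars.lowerChar (PySem.List.pyGetD l2 i ' ')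
  let placar := if char1 ∈ "amor".toList then placar + 2 else placar
  let placar := if char2 ∈ "amor".toList then placar + 2 else placar
  let placar := if char1 ∈ "aeiou".toList then placar + 1 else placar
  if char2 ∈ "aeiou".toList then placar + 1 else placar

def calcular_compatibilidade (nome1 : String) (nome2 : String) : Int :=
  let l1 := nome1.toList
  let l2 := nome2.toList
  let min_len : Int := min (PySem.List.len l1) (PySem.List.len l2)
  (PySem.List.pyRange 0 min_len 1).foldl (pvStepA l1 l2) 0

-- ===== PORT B =====
-- one name's contribution: build the frequency dict of its lowercased prefix, then sum over the letter sets
def pvContrib (pref : List Char) : Int :=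
  let freq : PySem.Dict Char Int :=
    pref.foldl (fun d c => d.insert c (d.getD c 0 + 1)) PySem.Dict.empty
  2 * (("amor".toList).map (fun c => freq.getD c 0)).sum
    + (("aeiou".toList).map (fun c => freq.getD c 0)).sum

def calcular_compatibilidade_alt (nome1 : String) (nome2 : String) : Int :=
  let min_len : Int := min (PySem.Str.len nome1) (PySem.Str.len nome2)
  -- nome[:min_len] with 0 ≤ min_len ≤ len(nome) is exactly List.take
  pvContrib (PySem.Chars.lower (nome1.toList.take min_len.toNat))
    + pvContrib (PySem.Chars.lower (nome2.toList.take min_len.toNat))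

-- ===== PRECONDITION & SPEC =====
def Spec_calcular_compatibilidade (nome1 : String) (nome2 : String) (out : Int) : Prop := out = calcular_compatibilidade_alt nome1 nome2
instance (nome1 : String) (nome2 : String) (out : Int) : Decidable (Spec_calcular_compatibilidade nome1 nome2 out) := by unfold Spec_calcular_compatibilidade; infer_instance

-- ===== CLAIM (what is proved, stated in full; the proofs are below) =====
def Claim_equal_calcular_compatibilidade : Prop := ∀ (nome1 : String) (nome2 : String), Dom_calcular_compatibilidade nome1 nome2 → Spec_calcular_compatibilidade nome1 nome2 (calcular_compatibilidade nome1 nome2)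

-- ===== LEMMAS AND PROOFS =====

-- the score one character contributes (after lowering)
def pvW (c : Char) : Int :=
  (if c ∈ "amor".toList then 2 else 0) + (if c ∈ "aeiou".toList then 1 else 0)

def pvS (cs : List Char) : Int := (cs.map pvW).sum

-- B's contribution written as letter counts
def pvCnt (t : List Char) : Int :=
  2 * ((['a','m','o','r'].map (fun c => (t.count c : Int))).sum)
    + (['a','e','i','o','u'].map (fun c => (t.count c : Int))).sum

theorem pvS_append_singleton (cs : List Char) (c : Char) :
    pvS (cs ++ [c]) = pvS cs + pvW c := by
  simp [pvS]

theorem pvCnt_cons (c : Char) (t : List Char) :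
    pvCnt (c :: t) = pvW c + pvCnt t := by
  have hA : ("amor".toList) = ['a','m','o','r'] := by decide
  have hV : ("aeiou".toList) = ['a','e','i','o','u'] := by decide
  simp only [pvCnt, pvW, hA, hV, List.map_cons, List.map_nil, List.sum_cons, List.sum_nil,
    List.count_cons]
  by_cases h1 : c = 'a' <;> by_cases h2 : c = 'e' <;> by_cases h3 : c = 'i' <;>
    by_cases h4 : c = 'o' <;> by_cases h5 : c = 'u' <;> by_cases h6 : c = 'm' <;>
    by_cases h7 : c = 'r' <;> simp_all <;> ring

theorem pvCnt_eq_pvS : ∀ t : List Char, pvCnt t = pvS t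
  | [] => by simp [pvCnt, pvS]
  | c :: t => by
      rw [pvCnt_cons, pvCnt_eq_pvS t]
      simp [pvS]

theorem pvContrib_eq (pref : List Char) : pvContrib pref = pvS pref := by
  rw [← pvCnt_eq_pvS]
  simp only [pvContrib, PySem.Dict.getD_foldl_insert_add_one, PySem.Dict.getD_empty]
  have hA : ("amor".toList) = ['a','m','o','r'] := by decide
  have hV : ("aeiou".toList) = ['a','e','i','o','u'] := by decide
  simp [pvCnt, hA, hV]

theorem pvStepA_val (l1 l2 : List Char) (acc i : Int) :
    pvStepA l1 l2 acc i
      = acc + pvW (PySem.Chars.lowerChar (PySem.List.pyGetD l1 i ' '))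
            + pvW (PySem.Chars.lowerChar (PySem.List.pyGetD l2 i ' ')) := by
  simp only [pvStepA, pvW]
  split_ifs <;> omega

theorem pvFoldA_eq (l1 l2 : List Char) (nn : Nat)
    (h1 : nn ≤ l1.length) (h2 : nn ≤ l2.length) :
    (PySem.List.pyRange 0 (nn : Int) 1).foldl (pvStepA l1 l2) 0
      = pvS ((l1.take nn).map PySem.Chars.lowerChar)
        + pvS ((l2.take nn).map PySem.Chars.lowerChar) := by
  induction nn with
  | zero =>
      rw [PySem.List.pyRange_one_eq_nil (by norm_num)]
      simp [pvS]
  | succ nn ih =>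
      have hnn1 : nn < l1.length := by omega
      have hnn2 : nn < l2.length := by omega
      have hcast : ((nn + 1 : Nat) : Int) = (nn : Int) + 1 := by push_cast; ring
      rw [hcast, PySem.List.pyRange_one_succ_right (by positivity), List.foldl_append,
        ih (by omega) (by omega), List.foldl_cons, List.foldl_nil, pvStepA_val]
      have g1 : PySem.List.pyGetD l1 (nn : Int) ' ' = l1[nn] := by
        simp [PySem.List.pyGetD, PySem.List.pyGet?, PySem.List.pyIdx?, hnn1]
      have g2 : PySem.List.pyGetD l2 (nn : Int) ' ' = l2[nn] := by
        simp [PySem.List.pyGetD, PySem.List.pyGet?, PySem.List.pyIdx?, hnn2]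
      have t1 : l1.take (nn + 1) = l1.take nn ++ [l1[nn]] := by
        rw [List.take_add_one]; simp [List.getElem?_eq_getElem hnn1]
      have t2 : l2.take (nn + 1) = l2.take nn ++ [l2[nn]] := by
        rw [List.take_add_one]; simp [List.getElem?_eq_getElem hnn2]
      rw [g1, g2, t1, t2]
      simp only [List.map_append, List.map_cons, List.map_nil, pvS_append_singleton]
      ring

-- ===== VERDICT (by name: the statement is the Claim_ definition above) =====
theorem calcular_compatibilidade_spec : Claim_equal_calcular_compatibilidade := by
  unfold Claim_equal_calcular_compatibilidade
  intro nome1 nome2 _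
  unfold Spec_calcular_compatibilidade
  unfold calcular_compatibilidade calcular_compatibilidade_alt
  set l1 := nome1.toList with hl1
  set l2 := nome2.toList with hl2
  have hm : (min (PySem.List.len l1) (PySem.List.len l2) : Int)
      = ((min l1.length l2.length : Nat) : Int) := by
    simp [PySem.List.len, Nat.cast_min]
  have hmS : (min (PySem.Str.len nome1) (PySem.Str.len nome2) : Int)
      = ((min l1.length l2.length : Nat) : Int) := by
    simp [PySem.Str.len, Nat.cast_min, hl1, hl2]
  simp only [hm, hmS]
  rw [pvFoldA_eq l1 l2 (min l1.length l2.length) (min_le_left _ _) (min_le_right _ _)]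
  have hlow : ∀ t : List Char, PySem.Chars.lower t = t.map PySem.Chars.lowerChar := fun _ => rfl
  rw [pvContrib_eq, pvContrib_eq, Int.toNat_natCast, hlow, hlow]
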